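-- pv_equiv track=rewrite | github.com/khunglong-di-code/cash_flow_optimization | graphCheck.py | _find_grid_dimensions_and_validate
-- ===== SOURCE A (Python) =====
-- import math
--
-- def _find_grid_dimensions_and_validate(num_vertices, adj_lists):
--     """
--     Hàm phụ trợ: Tìm kích thước lưới (m, n) và xác thực cấu trúc cơ bản.
--     Trả về (isValid, m, n) hoặc (False, None, None).
--     isValid là True nếu tìm thấy một cấu trúc lưới tiềm năng.
--     """
--     if num_vertices == 0: # Đồ thị rỗng không phải lưới hợp lệ để có kích thước
--         return False, None, None
--     if num_vertices == 1: # Lưới 1x1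
--         # Một đỉnh đơn lẻ không có cạnh (khuyên) là lưới 1x1.
--         if adj_lists and adj_lists[0] and (0 in adj_lists[0] or len(adj_lists[0]) > 0) :
--              return False, None, None # Có khuyên hoặc cạnh
--         return True, 1, 1
--
--     degrees = [0] * num_vertices
--     sum_of_degrees = 0
--     for i in range(num_vertices):
--         if i < len(adj_lists):
--             degree_i = len(adj_lists[i])
--             degrees[i] = degree_i
--             sum_of_degrees += degree_i
--             # Trong đồ thị lưới có nhiều hơn 1 đỉnh, không có đỉnh cô lập (bậc 0)
--             if degree_i == 0 and num_vertices > 1 : return False, None, None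
--             if degree_i > 4: return False, None, None # Bậc tối đa là 4 trong lưới 2D
--             # Kiểm tra đồ thị đơn
--             if i in adj_lists[i]: return False, None, None # Có khuyên
--             if len(set(adj_lists[i])) != degree_i: return False, None, None # Có cạnh lặp
--         else: # Lỗi dữ liệu adj_lists
--             return False, None, None
--
--     if sum_of_degrees % 2 != 0: # Tổng bậc phải chẵn
--         return False, None, None
--     num_edges = sum_of_degrees // 2
--
--     # Thử tìm các kích thước M, N của lưới
--     for m_cand in range(1, int(math.sqrt(num_vertices)) + 1):
--         if num_vertices % m_cand == 0:
--             n_cand = num_vertices // m_cand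
--
--             expected_edges = 0
--             if m_cand > 0 and n_cand > 0: # Đảm bảo cả hai chiều dương
--                 expected_edges = (m_cand - 1) * n_cand + m_cand * (n_cand - 1)
--
--             if num_edges == expected_edges:
--                 # Kiểm tra phân bố bậc (heuristic)
--                 deg_counts = {0:0, 1:0, 2:0, 3:0, 4:0}
--                 for d_val in degrees:
--                     if d_val in deg_counts:
--                         deg_counts[d_val] += 1
--                     # Các bậc > 4 đã bị loại ở trên
--
--                 if m_cand == 1 and n_cand == 1: # Trường hợp 1x1 (đã xử lý ở đầu hàm này)
--                     if deg_counts[0] == 1 and sum(deg_counts[d] for d in [1,2,3,4]) == 0 :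
--                          return True, m_cand, n_cand # (1,1)
--                 elif m_cand == 1 or n_cand == 1: # Là một đường thẳng (path graph) với V > 1
--                     if num_vertices > 1 and deg_counts[1] == 2 and deg_counts[2] == (num_vertices - 2) and \
--                        deg_counts[3] == 0 and deg_counts[4] == 0:
--                         # Ưu tiên trả về hàng < cột nếu là đường thẳng
--                         return True, min(m_cand,n_cand), max(m_cand,n_cand)
--                 else: # Lưới M_x_N với M,N > 1
--                     corners = 4
--                     edges_non_corner = 2 * (m_cand - 2) + 2 * (n_cand - 2)
--                     internal = (m_cand - 2) * (n_cand - 2)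
--                     if deg_counts[2] == corners and \
--                        deg_counts[3] == edges_non_corner and \
--                        deg_counts[4] == internal:
--                         # Ưu tiên trả về hàng < cột
--                         return True, min(m_cand,n_cand), max(m_cand,n_cand)
--
--     return False, None, None # Không tìm thấy kích thước lưới phù hợp
-- ===== SOURCE B (Python) =====
-- import math
--
-- def _find_grid_dimensions_and_validate(num_vertices, adj_lists):
--     # B: same validation pass, but the divisor loop is replaced by solving the
--     # quadratic t^2 - s*t + V = 0, s = 2V - E, via one integer sqrt.
--     if num_vertices == 0:
--         return False, None, None
--     if num_vertices == 1:
--         if adj_lists and adj_lists[0]: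
--             return False, None, None
--         return True, 1, 1
--     if len(adj_lists) < num_vertices:
--         return False, None, None
--
--     degrees = []
--     total = 0
--     for i in range(num_vertices):
--         nbrs = adj_lists[i]
--         d = len(nbrs)
--         if d == 0 or d > 4:
--             return False, None, None
--         if i in nbrs:
--             return False, None, None
--         if len(set(nbrs)) != d:
--             return False, None, None
--         degrees.append(d)
--         total += d
--     if total % 2 != 0:
--         return False, None, None
--     num_edges = total // 2
--
--     s = 2 * num_vertices - num_edges
--     disc = s * s - 4 * num_vertices
--     if disc < 0:
--         return False, None, None
--     r = math.isqrt(disc)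
--     if r * r != disc:
--         return False, None, None
--     m = (s - r) // 2
--     n = (s + r) // 2
--     if m < 1 or m * n != num_vertices:
--         return False, None, None
--
--     cnt = [0, 0, 0, 0, 0]
--     for d in degrees:
--         cnt[d] += 1
--     if m == 1:
--         if cnt[1] == 2 and cnt[2] == num_vertices - 2 and cnt[3] == 0 and cnt[4] == 0:
--             return True, m, n
--     else:
--         if cnt[2] == 4 and cnt[3] == 2 * (m - 2) + 2 * (n - 2) and cnt[4] == (m - 2) * (n - 2):
--             return True, m, n
--     return False, None, None
-- ===== Notes on version B (the rewrite author's own statement) =====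
-- stated objective: alternative
-- what changed: A's divisor-scan loop searching for grid dimensions is replaced by solving the quadratic t^2 - s*t + V = 0 (s = 2V - num_edges) with a single integer square root, then applying the degree-distribution validation once; the O(V) validation pass dominates, so the cost is similar.
import Mathlib
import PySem

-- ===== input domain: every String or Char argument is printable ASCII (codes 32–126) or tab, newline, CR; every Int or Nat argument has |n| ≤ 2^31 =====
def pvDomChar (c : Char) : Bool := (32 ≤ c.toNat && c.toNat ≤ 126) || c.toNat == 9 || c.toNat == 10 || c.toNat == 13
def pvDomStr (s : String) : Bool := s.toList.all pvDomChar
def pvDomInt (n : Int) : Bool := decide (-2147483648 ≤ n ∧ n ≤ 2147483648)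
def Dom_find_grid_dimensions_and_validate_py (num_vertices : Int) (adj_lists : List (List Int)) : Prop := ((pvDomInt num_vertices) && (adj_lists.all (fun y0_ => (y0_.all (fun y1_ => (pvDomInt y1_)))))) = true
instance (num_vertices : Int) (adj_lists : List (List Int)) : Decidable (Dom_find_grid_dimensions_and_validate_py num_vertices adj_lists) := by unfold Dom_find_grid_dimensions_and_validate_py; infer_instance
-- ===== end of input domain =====

-- B replaces A's divisor scan by solving t² - s·t + V = 0 with one integer square root
-- (alternative algorithm for the dimension search; the validation pass is the same logic
-- and dominates the cost, so B is not measurably faster).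

-- ===== PORT A =====

-- kernel-reducible integer square root (Newton/Heron iteration with structural fuel;
-- proof below that it equals Nat.sqrt): both Pythons' exact integer sqrt primitive
def pvNsqrtAux : Nat → Nat → Nat → Nat
  | 0, _, x => x
  | f + 1, n, x =>
    let y := (x + n / x) / 2
    if y < x then pvNsqrtAux f n y else x

def pvNsqrt (n : Nat) : Nat := pvNsqrtAux n n n

-- shared integer-sqrt primitive: ports A's int(math.sqrt(V)) — exact for 0 ≤ V ≤ 2^31,
-- where the IEEE double sqrt is correctly rounded and no non-square is within rounding
-- error of an integer, so truncation equals the integer square root — and B's math.isqrt.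
def pvIsqrt (V : Int) : Int := (pvNsqrt V.toNat : Int)

-- A's first for-loop: builds degrees/sum_of_degrees; `none` = an early `return False, None, None`.
def pvA_degLoop (num_vertices : Int) (adj_lists : List (List Int)) :
    List Int → List Int → Int → Option (List Int × Int)
  | [], degrees, s => some (degrees, s)
  | i :: rest, degrees, s =>
    if i < (adj_lists.length : Int) then
      let nbrs := PySem.List.pyGetD adj_lists i []
      let d : Int := (nbrs.length : Int)
      let degrees' := PySem.List.pySetD degrees i d
      let s' := s + d
      if d = 0 ∧ num_vertices > 1 then none
      else if d > 4 then none
      else if i ∈ nbrs then none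
      else if ((PySem.Set.ofList nbrs).length : Int) ≠ d then none
      else pvA_degLoop num_vertices adj_lists rest degrees' s'
    else none

-- deg_counts = {0:0,1:0,2:0,3:0,4:0}; for d_val in degrees: if d_val in deg_counts: deg_counts[d_val] += 1
def pvA_degCounts (degrees : List Int) : PySem.Dict Int Int :=
  degrees.foldl
    (fun dc dv => if dc.contains dv then dc.modify dv 0 (· + 1) else dc)
    (PySem.Dict.ofList [(0, 0), (1, 0), (2, 0), (3, 0), (4, 0)])

-- A's divisor loop `for m_cand in range(1, int(math.sqrt(num_vertices)) + 1)`.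
def pvA_divLoop (num_vertices num_edges : Int) (degrees : List Int) :
    List Int → Bool × Option Int × Option Int
  | [] => (false, none, none)
  | m :: rest =>
    if PySem.Int.mod num_vertices m = 0 then
      let n := PySem.Int.floordiv num_vertices m
      let expected : Int := if m > 0 ∧ n > 0 then (m - 1) * n + m * (n - 1) else 0
      if num_edges = expected then
        let dc := pvA_degCounts degrees
        if m = 1 ∧ n = 1 then
          if dc.getD 0 0 = 1 ∧ ([(1 : Int), 2, 3, 4].map (fun k => dc.getD k 0)).sum = 0 then
            (true, some m, some n)
          else pvA_divLoop num_vertices num_edges degrees rest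
        else if m = 1 ∨ n = 1 then
          if num_vertices > 1 ∧ dc.getD 1 0 = 2 ∧ dc.getD 2 0 = num_vertices - 2 ∧
              dc.getD 3 0 = 0 ∧ dc.getD 4 0 = 0 then
            (true, some (min m n), some (max m n))
          else pvA_divLoop num_vertices num_edges degrees rest
        else
          if dc.getD 2 0 = 4 ∧ dc.getD 3 0 = 2 * (m - 2) + 2 * (n - 2) ∧
              dc.getD 4 0 = (m - 2) * (n - 2) then
            (true, some (min m n), some (max m n))
          else pvA_divLoop num_vertices num_edges degrees rest
      else pvA_divLoop num_vertices num_edges degrees rest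
    else pvA_divLoop num_vertices num_edges degrees rest

def find_grid_dimensions_and_validate_py (num_vertices : Int) (adj_lists : List (List Int)) :
    Bool × Option Int × Option Int :=
  if num_vertices = 0 then (false, none, none)
  else if num_vertices = 1 then
    if adj_lists ≠ [] ∧ PySem.List.pyGetD adj_lists 0 [] ≠ [] ∧
        ((0 : Int) ∈ PySem.List.pyGetD adj_lists 0 [] ∨
          ((PySem.List.pyGetD adj_lists 0 []).length : Int) > 0) then
      (false, none, none)
    else (true, some 1, some 1)
  else
    match pvA_degLoop num_vertices adj_lists (PySem.List.pyRange 0 num_vertices 1)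
        (List.replicate num_vertices.toNat 0) 0 with
    | none => (false, none, none)
    | some (degrees, sum_of_degrees) =>
      if PySem.Int.mod sum_of_degrees 2 ≠ 0 then (false, none, none)
      else
        pvA_divLoop num_vertices (PySem.Int.floordiv sum_of_degrees 2) degrees
          (PySem.List.pyRange 1 (pvIsqrt num_vertices + 1) 1)

-- ===== PORT B =====

-- B's validation loop: appends to `degrees`, accumulates `total`; `none` = early False return.
def pvB_degLoop (adj_lists : List (List Int)) :
    List Int → List Int → Int → Option (List Int × Int)
  | [], degrees, total => some (degrees, total)
  | i :: rest, degrees, total =>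
    let nbrs := PySem.List.pyGetD adj_lists i []
    let d : Int := (nbrs.length : Int)
    if d = 0 ∨ d > 4 then none
    else if i ∈ nbrs then none
    else if ((PySem.Set.ofList nbrs).length : Int) ≠ d then none
    else pvB_degLoop adj_lists rest (degrees ++ [d]) (total + d)

-- cnt = [0,0,0,0,0]; for d in degrees: cnt[d] += 1
def pvB_cnt (degrees : List Int) : List Int :=
  degrees.foldl (fun c d => PySem.List.pySetD c d (PySem.List.pyGetD c d 0 + 1))
    [0, 0, 0, 0, 0]

-- B from `s = 2*num_vertices - num_edges` on: the quadratic replacing A's divisor loop.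
def pvB_quad (num_vertices num_edges : Int) (degrees : List Int) :
    Bool × Option Int × Option Int :=
  let s := 2 * num_vertices - num_edges
  let disc := s * s - 4 * num_vertices
  if disc < 0 then (false, none, none)
  else
    let r := pvIsqrt disc
    if r * r ≠ disc then (false, none, none)
    else
      let m := PySem.Int.floordiv (s - r) 2
      let n := PySem.Int.floordiv (s + r) 2
      if m < 1 ∨ m * n ≠ num_vertices then (false, none, none)
      else
        let cnt := pvB_cnt degrees
        if m = 1 then
          if PySem.List.pyGetD cnt 1 0 = 2 ∧ PySem.List.pyGetD cnt 2 0 = num_vertices - 2 ∧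
              PySem.List.pyGetD cnt 3 0 = 0 ∧ PySem.List.pyGetD cnt 4 0 = 0 then
            (true, some m, some n)
          else (false, none, none)
        else
          if PySem.List.pyGetD cnt 2 0 = 4 ∧
              PySem.List.pyGetD cnt 3 0 = 2 * (m - 2) + 2 * (n - 2) ∧
              PySem.List.pyGetD cnt 4 0 = (m - 2) * (n - 2) then
            (true, some m, some n)
          else (false, none, none)

def find_grid_dimensions_and_validate_py_alt (num_vertices : Int) (adj_lists : List (List Int)) :
    Bool × Option Int × Option Int :=
  if num_vertices = 0 then (false, none, none)
  else if num_vertices = 1 then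
    if adj_lists ≠ [] ∧ PySem.List.pyGetD adj_lists 0 [] ≠ [] then (false, none, none)
    else (true, some 1, some 1)
  else if (adj_lists.length : Int) < num_vertices then (false, none, none)
  else
    match pvB_degLoop adj_lists (PySem.List.pyRange 0 num_vertices 1) [] 0 with
    | none => (false, none, none)
    | some (degrees, total) =>
      if PySem.Int.mod total 2 ≠ 0 then (false, none, none)
      else pvB_quad num_vertices (PySem.Int.floordiv total 2) degrees

-- ===== PRECONDITION & SPEC =====
-- Pre_ excludes num_vertices < 0, where Python A raises ValueError at math.sqrt(num_vertices).
def Pre_find_grid_dimensions_and_validate_py (num_vertices : Int) (adj_lists : List (List Int)) : Prop :=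
  0 ≤ num_vertices
instance (num_vertices : Int) (adj_lists : List (List Int)) :
    Decidable (Pre_find_grid_dimensions_and_validate_py num_vertices adj_lists) := by
  unfold Pre_find_grid_dimensions_and_validate_py; infer_instance

def pvWitness_find_grid_dimensions_and_validate_py : Int × List (List Int) :=
  (6, [[1], [0, 2], [1, 3], [2, 4], [3, 5], [4]])

def Spec_find_grid_dimensions_and_validate_py (num_vertices : Int) (adj_lists : List (List Int))
    (out : Bool × Option Int × Option Int) : Prop :=
  out = find_grid_dimensions_and_validate_py_alt num_vertices adj_lists
instance (num_vertices : Int) (adj_lists : List (List Int)) (out : Bool × Option Int × Option Int) :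
    Decidable (Spec_find_grid_dimensions_and_validate_py num_vertices adj_lists out) := by
  unfold Spec_find_grid_dimensions_and_validate_py; infer_instance

-- ===== CLAIM (what is proved, stated in full; the proofs are below) =====
def Claim_equal_find_grid_dimensions_and_validate_py : Prop := ∀ (num_vertices : Int) (adj_lists : List (List Int)), Dom_find_grid_dimensions_and_validate_py num_vertices adj_lists → Pre_find_grid_dimensions_and_validate_py num_vertices adj_lists → Spec_find_grid_dimensions_and_validate_py num_vertices adj_lists (find_grid_dimensions_and_validate_py num_vertices adj_lists)


-- ===== LEMMAS AND PROOFS =====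

lemma pvNsqrtAux_eq (f : Nat) : ∀ (n x : Nat), Nat.sqrt n ≤ x → x ≤ f →
    pvNsqrtAux f n x = Nat.sqrt n := by
  induction f with
  | zero =>
    intro n x h1 h2
    interval_cases x
    simp only [pvNsqrtAux]; omega
  | succ f ih =>
    intro n x h1 h2
    simp only [pvNsqrtAux]
    by_cases hy : (x + n / x) / 2 < x
    · simp only [hy, if_true]
      have hx0 : 0 < x := lt_of_le_of_lt (Nat.zero_le _) hy
      have hs2 : Nat.sqrt n * Nat.sqrt n ≤ n := Nat.sqrt_le n
      have ha : Nat.sqrt n * Nat.sqrt n / x ≤ n / x := Nat.div_le_div_right hs2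
      have hb : 2 * Nat.sqrt n - x ≤ Nat.sqrt n * Nat.sqrt n / x := by
        rw [Nat.le_div_iff_mul_le hx0]
        by_cases h : 2 * Nat.sqrt n ≤ x
        · simp [Nat.sub_eq_zero_of_le h]
        · have hxle : x ≤ 2 * Nat.sqrt n := by omega
          zify [hxle]
          nlinarith [sq_nonneg ((Nat.sqrt n : Int) - x)]
      have hinv : Nat.sqrt n ≤ (x + n / x) / 2 := by
        rw [Nat.le_div_iff_mul_le (by omega : 0 < 2)]
        omega
      exact ih n _ hinv (Nat.lt_succ_iff.1 (lt_of_lt_of_le hy h2))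
    · simp only [hy, if_false]
      by_cases hx : x = 0
      · omega
      · have hx0 : 0 < x := Nat.pos_of_ne_zero hx
        have hle : x ≤ n / x := by omega
        have hxx : x * x ≤ n := (Nat.le_div_iff_mul_le hx0).1 hle
        have := Nat.le_sqrt.2 hxx
        omega

lemma pvNsqrt_eq (n : Nat) : pvNsqrt n = Nat.sqrt n :=
  pvNsqrtAux_eq n n n (Nat.sqrt_le_self n) le_rfl

-- degree of vertex i
def pvDeg (adj_lists : List (List Int)) (i : Int) : Int :=
  ((PySem.List.pyGetD adj_lists i []).length : Int)

-- the per-vertex validity test shared by both loops (B's form; no length guard)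
abbrev pvOk (adj_lists : List (List Int)) (i : Int) : Prop :=
  ¬(pvDeg adj_lists i = 0 ∨ pvDeg adj_lists i > 4) ∧
    i ∉ PySem.List.pyGetD adj_lists i [] ∧
    ((PySem.Set.ofList (PySem.List.pyGetD adj_lists i [])).length : Int) = pvDeg adj_lists i

lemma pvB_degLoop_spec (adj : List (List Int)) (L : List Int) : ∀ (acc : List Int) (t : Int),
    pvB_degLoop adj L acc t =
      if ∀ i ∈ L, pvOk adj i then
        some (acc ++ L.map (pvDeg adj), t + (L.map (pvDeg adj)).sum)
      else none := by
  induction L with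
  | nil => intro acc t; simp [pvB_degLoop]
  | cons i rest ih =>
    intro acc t
    simp only [List.forall_mem_cons]
    show (if ((PySem.List.pyGetD adj i []).length : Int) = 0 ∨ ((PySem.List.pyGetD adj i []).length : Int) > 4 then none
      else if i ∈ PySem.List.pyGetD adj i [] then none
      else if ((PySem.Set.ofList (PySem.List.pyGetD adj i [])).length : Int) ≠ ((PySem.List.pyGetD adj i []).length : Int) then none
      else pvB_degLoop adj rest (acc ++ [((PySem.List.pyGetD adj i []).length : Int)]) (t + ((PySem.List.pyGetD adj i []).length : Int))) = _
    by_cases ha : ((PySem.List.pyGetD adj i []).length : Int) = 0 ∨ ((PySem.List.pyGetD adj i []).length : Int) > 4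
    · rw [if_pos ha, if_neg (fun h => h.1.1 ha)]
    · rw [if_neg ha]
      by_cases hb : i ∈ PySem.List.pyGetD adj i []
      · rw [if_pos hb, if_neg (fun h => h.1.2.1 hb)]
      · rw [if_neg hb]
        by_cases hc : ((PySem.Set.ofList (PySem.List.pyGetD adj i [])).length : Int) ≠ ((PySem.List.pyGetD adj i []).length : Int)
        · rw [if_pos hc, if_neg (fun h => hc h.1.2.2)]
        · have hok : pvOk adj i := ⟨ha, hb, not_not.1 hc⟩
          rw [if_neg hc, ih]
          by_cases h4 : ∀ j ∈ rest, pvOk adj j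
          · rw [if_pos h4, if_pos ⟨hok, h4⟩]
            simp only [List.map_cons, List.sum_cons, List.append_assoc, List.singleton_append,
              pvDeg]
            exact congrArg some (by rw [add_assoc])
          · rw [if_neg h4, if_neg (fun h => h4 h.2)]

lemma pvA_degLoop_spec (V : Int) (adj : List (List Int)) (hV : 1 < V) (L : List Int) :
    ∀ (acc : List Int) (t : Int),
    pvA_degLoop V adj L acc t =
      if ∀ i ∈ L, (i < (adj.length : Int) ∧ pvOk adj i) then
        some (L.foldl (fun dg i => PySem.List.pySetD dg i (pvDeg adj i)) acc,
              t + (L.map (pvDeg adj)).sum)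
      else none := by
  induction L with
  | nil => intro acc t; simp [pvA_degLoop]
  | cons i rest ih =>
    intro acc t
    simp only [List.forall_mem_cons]
    show (if i < (adj.length : Int) then
        if ((PySem.List.pyGetD adj i []).length : Int) = 0 ∧ V > 1 then none
        else if ((PySem.List.pyGetD adj i []).length : Int) > 4 then none
        else if i ∈ PySem.List.pyGetD adj i [] then none
        else if ((PySem.Set.ofList (PySem.List.pyGetD adj i [])).length : Int) ≠ ((PySem.List.pyGetD adj i []).length : Int) then none
        else pvA_degLoop V adj rest (PySem.List.pySetD acc i ((PySem.List.pyGetD adj i []).length : Int)) (t + ((PySem.List.pyGetD adj i []).length : Int))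
      else none) = _
    by_cases hlen : i < (adj.length : Int)
    · rw [if_pos hlen]
      by_cases h0 : ((PySem.List.pyGetD adj i []).length : Int) = 0 ∧ V > 1
      · rw [if_pos h0, if_neg (fun h => h.1.2.1 (Or.inl h0.1))]
      · rw [if_neg h0]
        by_cases h4 : ((PySem.List.pyGetD adj i []).length : Int) > 4
        · rw [if_pos h4, if_neg (fun h => h.1.2.1 (Or.inr h4))]
        · rw [if_neg h4]
          by_cases hb : i ∈ PySem.List.pyGetD adj i []
          · rw [if_pos hb, if_neg (fun h => h.1.2.2.1 hb)]
          · rw [if_neg hb]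
            by_cases hc : ((PySem.Set.ofList (PySem.List.pyGetD adj i [])).length : Int) ≠ ((PySem.List.pyGetD adj i []).length : Int)
            · rw [if_pos hc, if_neg (fun h => hc h.1.2.2.2)]
            · have hok : pvOk adj i := ⟨fun hor => hor.elim (fun hz => h0 ⟨hz, hV⟩) h4, hb, not_not.1 hc⟩
              rw [if_neg hc, ih]
              by_cases hr : ∀ j ∈ rest, (j < (adj.length : Int) ∧ pvOk adj j)
              · rw [if_pos hr, if_pos ⟨⟨hlen, hok⟩, hr⟩]
                simp only [List.foldl_cons, List.map_cons, List.sum_cons, pvDeg]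
                exact congrArg some (by rw [add_assoc])
              · rw [if_neg hr, if_neg (fun h => hr h.2)]
    · rw [if_neg hlen, if_neg (fun h => hlen h.1.1)]

-- writing pvDeg into slot i over range 0..V-1 turns [0]*V into the map of degrees
lemma pv_foldl_set_aux (f : Int → Int) (m : Nat) : ∀ (k : Nat), k ≤ m →
    ((List.range k).map (fun j : Nat => (j : Int))).foldl
        (fun dg i => PySem.List.pySetD dg i (f i)) (List.replicate m 0) =
      ((List.range k).map (fun j : Nat => (j : Int))).map f ++ List.replicate (m - k) (0 : Int) := by
  intro k
  induction k with
  | zero => intro _; simp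
  | succ k ih =>
    intro hk
    rw [List.range_succ]
    simp only [List.map_append, List.foldl_append, List.map_cons, List.map_nil,
      List.foldl_cons, List.foldl_nil]
    rw [ih (by omega)]
    rw [PySem.List.pySetD_of_nonneg _ _ (by positivity)]
    rw [Int.toNat_natCast]
    rw [List.set_append_right _ _ (by simp)]
    simp only [List.length_map, List.length_range, Nat.sub_self]
    rw [show m - k = (m - (k+1)) + 1 by omega, List.replicate_succ]
    simp [List.append_assoc]

lemma pvA_degrees_eq_map (adj : List (List Int)) (n : Nat) :
    (PySem.List.pyRange 0 (n : Int) 1).foldl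
        (fun dg i => PySem.List.pySetD dg i (pvDeg adj i)) (List.replicate n 0) =
      (PySem.List.pyRange 0 (n : Int) 1).map (pvDeg adj) := by
  rw [PySem.List.pyRange_zero_natCast, pv_foldl_set_aux (pvDeg adj) n n le_rfl]
  simp

-- A's deg_counts dict computes plain counts (all degrees in 1..4)
lemma pvA_cnt_aux (ds : List Int) : ∀ (dc : PySem.Dict Int Int),
    (∀ x ∈ ds, dc.contains x = true) → ∀ (k : Int),
    (ds.foldl (fun dc dv => if dc.contains dv then dc.modify dv 0 (· + 1) else dc) dc).getD k 0 =
      dc.getD k 0 + (ds.count k : Int) := by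
  induction ds with
  | nil => intro dc _ k; simp
  | cons d rest ih =>
    intro dc hc k
    simp only [List.foldl_cons, hc d List.mem_cons_self, if_true]
    rw [ih _ (fun x hx => by
      rw [PySem.Dict.contains_modify]
      simp [hc x (List.mem_cons_of_mem _ hx)]) k]
    by_cases hk : k = d
    · subst hk
      rw [PySem.Dict.getD_modify_self]
      simp [List.count_cons_self]
      ring
    · rw [PySem.Dict.getD_modify_of_ne dc 0 _ hk]
      rw [List.count_cons_of_ne (by exact fun h => hk (by simpa using h.symm))]

lemma pvA_degCounts_getD (ds : List Int) (hds : ∀ x ∈ ds, 1 ≤ x ∧ x ≤ 4) (k : Int)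
    (hk : k = 1 ∨ k = 2 ∨ k = 3 ∨ k = 4) :
    (pvA_degCounts ds).getD k 0 = (ds.count k : Int) := by
  unfold pvA_degCounts
  rw [pvA_cnt_aux ds _ (fun x hx => by
    obtain ⟨h1, h2⟩ := hds x hx
    interval_cases x <;> decide) k]
  rcases hk with rfl | rfl | rfl | rfl <;> simp <;> decide

-- B's cnt list computes plain counts too
lemma pvB_cnt_aux (ds : List Int) : ∀ (c : List Int), c.length = 5 →
    (∀ x ∈ ds, 1 ≤ x ∧ x ≤ 4) → ∀ (k : Nat), k < 5 →
    (ds.foldl (fun c d => PySem.List.pySetD c d (PySem.List.pyGetD c d 0 + 1)) c).getD k 0 =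
      c.getD k 0 + ((ds.count (k : Int)) : Int) := by
  induction ds with
  | nil => intro c _ _ k _; simp
  | cons d rest ih =>
    intro c hlen hds k hk
    have hd := hds d List.mem_cons_self
    simp only [List.foldl_cons]
    rw [PySem.List.pySetD_of_nonneg _ _ (by omega), PySem.List.pyGetD_of_nonneg _ _ (by omega)]
    rw [ih _ (by simp [hlen]) (fun x hx => hds x (List.mem_cons_of_mem _ hx)) k hk]
    by_cases hkd : (k : Int) = d
    · obtain rfl : d = (k : Int) := hkd.symm
      simp only [Int.toNat_natCast]
      rw [List.count_cons_self]
      have hkl : k < c.length := by omega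
      simp [List.getD_eq_getElem?_getD, List.getElem?_set_self hkl]
      omega
    · rw [List.count_cons_of_ne (fun h => hkd (by simpa using h.symm))]
      simp [List.getD_eq_getElem?_getD, List.getElem?_set_ne (by omega : d.toNat ≠ k)]

lemma pvB_cnt_getD (ds : List Int) (hds : ∀ x ∈ ds, 1 ≤ x ∧ x ≤ 4) (k : Int)
    (hk : 1 ≤ k ∧ k ≤ 4) :
    PySem.List.pyGetD (pvB_cnt ds) k 0 = (ds.count k : Int) := by
  unfold pvB_cnt
  rw [PySem.List.pyGetD_of_nonneg _ _ (by omega)]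
  rw [pvB_cnt_aux ds [0,0,0,0,0] rfl hds k.toNat (by omega)]
  rw [show ((k.toNat : Int)) = k by omega]
  obtain ⟨h1, h2⟩ := hk
  interval_cases k <;> simp

-- "m_cand is accepted by the divisibility + edge-count test"
abbrev pvGood (V E m : Int) : Prop :=
  PySem.Int.mod V m = 0 ∧
    E = (if m > 0 ∧ PySem.Int.floordiv V m > 0 then
          (m - 1) * PySem.Int.floordiv V m + m * (PySem.Int.floordiv V m - 1) else 0)

lemma pvA_divLoop_allBad (V E : Int) (deg : List Int) (L : List Int)
    (h : ∀ m ∈ L, ¬ pvGood V E m) :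
    pvA_divLoop V E deg L = (false, none, none) := by
  induction L with
  | nil => rfl
  | cons m rest ih =>
    have hm := h m List.mem_cons_self
    have hrest := fun x hx => h x (List.mem_cons_of_mem _ hx)
    simp only [pvA_divLoop]
    by_cases h1 : PySem.Int.mod V m = 0
    · rw [if_pos h1]
      by_cases h2 : E = (if m > 0 ∧ PySem.Int.floordiv V m > 0 then
          (m - 1) * PySem.Int.floordiv V m + m * (PySem.Int.floordiv V m - 1) else 0)
      · exact absurd ⟨h1, h2⟩ hm
      · rw [if_neg h2]
        exact ih hrest
    · rw [if_neg h1]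
      exact ih hrest

lemma pvA_divLoop_append (V E : Int) (deg : List Int) (L1 L2 : List Int)
    (h : ∀ m ∈ L1, ¬ pvGood V E m) :
    pvA_divLoop V E deg (L1 ++ L2) = pvA_divLoop V E deg L2 := by
  induction L1 with
  | nil => rfl
  | cons m rest ih =>
    have hm := h m List.mem_cons_self
    have hrest := fun x hx => h x (List.mem_cons_of_mem _ hx)
    simp only [List.cons_append, pvA_divLoop]
    by_cases h1 : PySem.Int.mod V m = 0
    · rw [if_pos h1]
      by_cases h2 : E = (if m > 0 ∧ PySem.Int.floordiv V m > 0 then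
          (m - 1) * PySem.Int.floordiv V m + m * (PySem.Int.floordiv V m - 1) else 0)
      · exact absurd ⟨h1, h2⟩ hm
      · rw [if_neg h2]
        exact ih hrest
    · rw [if_neg h1]
      exact ih hrest

-- characterisation of pvGood on 1 ≤ m ≤ √V for V ≥ 2
-- m ≤ √V (as computed by the ports) means m*m ≤ V
lemma pv_le_isqrt_iff (V m : Int) (hV : 0 ≤ V) (hm : 1 ≤ m) :
    m ≤ pvIsqrt V ↔ m * m ≤ V := by
  unfold pvIsqrt
  rw [pvNsqrt_eq]
  have hmm : ((m.toNat : Int)) = m := Int.toNat_of_nonneg (by omega)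
  have hvv : ((V.toNat : Int)) = V := Int.toNat_of_nonneg hV
  constructor
  · intro h
    have h1 : m.toNat ≤ Nat.sqrt V.toNat := by omega
    have h2 := Nat.le_sqrt.1 h1
    have h3 : ((m.toNat : Int)) * ((m.toNat : Int)) ≤ ((V.toNat : Int)) := by exact_mod_cast h2
    rwa [hmm, hvv] at h3
  · intro h
    have h1 : m.toNat * m.toNat ≤ V.toNat := by
      have h3 : ((m.toNat : Int)) * ((m.toNat : Int)) ≤ ((V.toNat : Int)) := by
        rw [hmm, hvv]; exact h
      exact_mod_cast h3
    have := Nat.le_sqrt.2 h1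
    omega

lemma pvGood_iff (V E m : Int) (hV : 2 ≤ V) (hm : 1 ≤ m) (hq : m ≤ pvIsqrt V) :
    pvGood V E m ↔ m ∣ V ∧ m + V / m = 2 * V - E := by
  have hm0 : (0:Int) < m := by omega
  unfold pvGood
  rw [PySem.Int.mod_eq_zero_iff_dvd, PySem.Int.floordiv_eq_ediv_of_pos hm0]
  constructor
  · rintro ⟨hd, h2⟩
    refine ⟨hd, ?_⟩
    obtain ⟨n, rfl⟩ := hd
    have hn' : m * n / m = n := Int.mul_ediv_cancel_left n (by omega)
    rw [hn'] at h2 ⊢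
    have hnpos : 0 < n := by nlinarith
    rw [if_pos ⟨hm0, hnpos⟩] at h2
    nlinarith [h2]
  · rintro ⟨hd, h2⟩
    refine ⟨hd, ?_⟩
    obtain ⟨n, rfl⟩ := hd
    have hn' : m * n / m = n := Int.mul_ediv_cancel_left n (by omega)
    rw [hn'] at h2 ⊢
    have hnpos : 0 < n := by nlinarith
    rw [if_pos ⟨hm0, hnpos⟩]
    nlinarith [h2]

-- at most one good m in [1, √V]
lemma pvGood_unique (V E m₁ m₂ : Int) (hV : 2 ≤ V)
    (h1 : 1 ≤ m₁) (hq1 : m₁ ≤ pvIsqrt V) (h2 : 1 ≤ m₂) (hq2 : m₂ ≤ pvIsqrt V)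
    (g1 : pvGood V E m₁) (g2 : pvGood V E m₂) : m₁ = m₂ := by
  obtain ⟨hd1, hs1⟩ := (pvGood_iff V E m₁ hV h1 hq1).1 g1
  obtain ⟨hd2, hs2⟩ := (pvGood_iff V E m₂ hV h2 hq2).1 g2
  have hsq1 : m₁ * m₁ ≤ V := (pv_le_isqrt_iff V m₁ (by omega) h1).1 hq1
  have hsq2 : m₂ * m₂ ≤ V := (pv_le_isqrt_iff V m₂ (by omega) h2).1 hq2
  set n₁ := V / m₁ with hn₁
  set n₂ := V / m₂ with hn₂
  have hmn1 : m₁ * n₁ = V := Int.mul_ediv_cancel' hd1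
  have hmn2 : m₂ * n₂ = V := Int.mul_ediv_cancel' hd2
  have hle1 : m₁ ≤ n₁ := by nlinarith
  have hle2 : m₂ ≤ n₂ := by nlinarith
  have hz : (m₁ - m₂) * (m₁ - n₂) = 0 := by nlinarith
  rcases mul_eq_zero.1 hz with h | h
  · omega
  · have hm1n2 : m₁ = n₂ := by omega
    have hn1m2 : n₁ = m₂ := by omega
    omega

-- the central lemma: A's divisor loop = B's quadratic, for V ≥ 2 and degrees all in 1..4
lemma pvTail_eq (V E : Int) (degrees : List Int) (hV : 2 ≤ V)
    (hds : ∀ x ∈ degrees, 1 ≤ x ∧ x ≤ 4) :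
    pvA_divLoop V E degrees (PySem.List.pyRange 1 (pvIsqrt V + 1) 1) =
      pvB_quad V E degrees := by
  have hq0 : 0 ≤ pvIsqrt V := by unfold pvIsqrt; positivity
  by_cases hex : ∃ m, 1 ≤ m ∧ m ≤ pvIsqrt V ∧ pvGood V E m
  · obtain ⟨m, hm1, hmq, hg⟩ := hex
    have hm0 : (0:Int) < m := by omega
    obtain ⟨hd, hs⟩ := (pvGood_iff V E m hV hm1 hmq).1 hg
    set n := V / m with hn
    have hmn : m * n = V := Int.mul_ediv_cancel' hd
    have hmm : m * m ≤ V := (pv_le_isqrt_iff V m (by omega) hm1).1 hmq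
    have hmlen : m ≤ n := le_of_mul_le_mul_left (by omega) hm0
    have hn1 : 1 ≤ n := by nlinarith
    have hn2 : 2 ≤ n := by
      rcases eq_or_lt_of_le hn1 with h | h
      · exfalso; have hm1' : m = 1 := by omega
        rw [hm1', ← h] at hmn; omega
      · omega
    -- ===== B side reduces to the branch test at (m, n) =====
    have hsB : 2 * V - E = m + n := hs.symm
    have hdisc : (m + n) * (m + n) - 4 * V = (n - m) * (n - m) := by linear_combination 4 * hmn
    have hBr : pvIsqrt ((n - m) * (n - m)) = n - m := by
      unfold pvIsqrt
      rw [pvNsqrt_eq]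
      rw [show (n - m) * (n - m) = ((n - m).toNat : Int) * ((n - m).toNat : Int) by
        rw [Int.toNat_of_nonneg (by omega)]]
      rw [← Nat.cast_mul, Int.toNat_natCast, ← Nat.pow_two, Nat.sqrt_eq']
      omega
    have hB : pvB_quad V E degrees =
        (if m = 1 then
          if PySem.List.pyGetD (pvB_cnt degrees) 1 0 = 2 ∧
              PySem.List.pyGetD (pvB_cnt degrees) 2 0 = V - 2 ∧
              PySem.List.pyGetD (pvB_cnt degrees) 3 0 = 0 ∧
              PySem.List.pyGetD (pvB_cnt degrees) 4 0 = 0 then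
            (true, some m, some n)
          else (false, none, none)
        else
          if PySem.List.pyGetD (pvB_cnt degrees) 2 0 = 4 ∧
              PySem.List.pyGetD (pvB_cnt degrees) 3 0 = 2 * (m - 2) + 2 * (n - 2) ∧
              PySem.List.pyGetD (pvB_cnt degrees) 4 0 = (m - 2) * (n - 2) then
            (true, some m, some n)
          else (false, none, none)) := by
      unfold pvB_quad
      dsimp only []
      rw [hsB, hdisc, hBr]
      rw [if_neg (by nlinarith : ¬ (n - m) * (n - m) < 0)]
      rw [if_neg (by omega : ¬ (n - m) * (n - m) ≠ (n - m) * (n - m))]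
      rw [show m + n - (n - m) = 2 * m by ring, show m + n + (n - m) = 2 * n by ring]
      rw [PySem.Int.floordiv_eq_ediv_of_pos (by omega : (0:Int) < 2),
          PySem.Int.floordiv_eq_ediv_of_pos (by omega : (0:Int) < 2)]
      rw [Int.mul_ediv_cancel_left m (by omega), Int.mul_ediv_cancel_left n (by omega)]
      rw [if_neg (by push Not; exact ⟨by omega, hmn⟩)]
    -- ===== A side: scan reaches m, no other candidate is good =====
    have huniq : ∀ x, 1 ≤ x → x ≤ pvIsqrt V → pvGood V E x → x = m := fun x h1 h2 hg' =>
      pvGood_unique V E x m hV h1 h2 hm1 hmq hg' hg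
    have hA1 : PySem.List.pyRange 1 (pvIsqrt V + 1) 1 =
        PySem.List.pyRange 1 m 1 ++ PySem.List.pyRange m (pvIsqrt V + 1) 1 :=
      PySem.List.pyRange_one_append 1 m (pvIsqrt V + 1) hm1 (by omega)
    have hA2 : PySem.List.pyRange m (pvIsqrt V + 1) 1 =
        m :: PySem.List.pyRange (m + 1) (pvIsqrt V + 1) 1 :=
      PySem.List.pyRange_one_cons (by omega)
    have hbad1 : ∀ x ∈ PySem.List.pyRange 1 m 1, ¬ pvGood V E x := by
      intro x hx hg'
      rw [PySem.List.mem_pyRange_one] at hx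
      have := huniq x hx.1 (by omega) hg'
      omega
    have hbad2 : ∀ x ∈ PySem.List.pyRange (m + 1) (pvIsqrt V + 1) 1, ¬ pvGood V E x := by
      intro x hx hg'
      rw [PySem.List.mem_pyRange_one] at hx
      have := huniq x (by omega) (by omega) hg'
      omega
    rw [hA1, pvA_divLoop_append V E degrees _ _ hbad1, hA2]
    show (if PySem.Int.mod V m = 0 then
        if E = (if m > 0 ∧ PySem.Int.floordiv V m > 0 then
            (m - 1) * PySem.Int.floordiv V m + m * (PySem.Int.floordiv V m - 1) else 0) then
          (if m = 1 ∧ PySem.Int.floordiv V m = 1 then _ else _)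
        else _
      else _) = _
    rw [if_pos hg.1, if_pos hg.2]
    rw [PySem.Int.floordiv_eq_ediv_of_pos hm0, ← hn]
    rw [if_neg (by omega : ¬ (m = 1 ∧ n = 1))]
    rw [hB]
    by_cases hm1' : m = 1
    · rw [if_pos (Or.inl hm1'), if_pos hm1']
      rw [pvA_degCounts_getD degrees hds 1 (by omega), pvA_degCounts_getD degrees hds 2 (by omega),
          pvA_degCounts_getD degrees hds 3 (by omega), pvA_degCounts_getD degrees hds 4 (by omega),
          pvB_cnt_getD degrees hds 1 (by omega), pvB_cnt_getD degrees hds 2 (by omega),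
          pvB_cnt_getD degrees hds 3 (by omega), pvB_cnt_getD degrees hds 4 (by omega)]
      by_cases hT : (degrees.count 1 : Int) = 2 ∧ (degrees.count 2 : Int) = V - 2 ∧
          (degrees.count 3 : Int) = 0 ∧ (degrees.count 4 : Int) = 0
      · rw [if_pos ⟨by omega, hT.1, hT.2.1, hT.2.2.1, hT.2.2.2⟩, if_pos hT]
        rw [min_eq_left hmlen, max_eq_right hmlen]
      · rw [if_neg (fun h => hT ⟨h.2.1, h.2.2.1, h.2.2.2.1, h.2.2.2.2⟩), if_neg hT]
        exact pvA_divLoop_allBad V E degrees _ hbad2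
    · rw [if_neg (by omega : ¬ (m = 1 ∨ n = 1)), if_neg hm1']
      rw [pvA_degCounts_getD degrees hds 2 (by omega),
          pvA_degCounts_getD degrees hds 3 (by omega), pvA_degCounts_getD degrees hds 4 (by omega),
          pvB_cnt_getD degrees hds 2 (by omega),
          pvB_cnt_getD degrees hds 3 (by omega), pvB_cnt_getD degrees hds 4 (by omega)]
      by_cases hT : (degrees.count 2 : Int) = 4 ∧
          (degrees.count 3 : Int) = 2 * (m - 2) + 2 * (n - 2) ∧
          (degrees.count 4 : Int) = (m - 2) * (n - 2)
      · rw [if_pos hT, if_pos hT]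
        rw [min_eq_left hmlen, max_eq_right hmlen]
      · rw [if_neg hT, if_neg hT]
        exact pvA_divLoop_allBad V E degrees _ hbad2
  · -- no good candidate: both sides return (false, none, none)
    rw [pvA_divLoop_allBad V E degrees _ (by
      intro x hx hg'
      rw [PySem.List.mem_pyRange_one] at hx
      exact hex ⟨x, hx.1, by omega, hg'⟩)]
    unfold pvB_quad
    dsimp only []
    by_cases h0 : (2 * V - E) * (2 * V - E) - 4 * V < 0
    · rw [if_pos h0]
    · rw [if_neg h0]
      set s := 2 * V - E with hsdef
      set r := pvIsqrt (s * s - 4 * V) with hrdef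
      have hr0 : 0 ≤ r := by rw [hrdef]; unfold pvIsqrt; positivity
      by_cases h1 : r * r ≠ s * s - 4 * V
      · rw [if_pos h1]
      · rw [if_neg h1]
        set mB := PySem.Int.floordiv (s - r) 2 with hmBdef
        set nB := PySem.Int.floordiv (s + r) 2 with hnBdef
        by_cases h2 : mB < 1 ∨ mB * nB ≠ V
        · rw [if_pos h2]
        · exfalso
          push Not at h1 h2
          obtain ⟨hmB1, hmBnB⟩ := h2
          -- s and r have the same parity since s² - r² = 4V
          have heven : Even (s - r) := by
            rw [Int.even_sub]
            have hss : Even (s * s - r * r) := ⟨2 * V, by linear_combination -h1⟩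
            rw [Int.even_sub] at hss
            constructor <;> intro h
            · exact (Int.even_mul.1 (hss.1 (Int.even_mul.2 (Or.inl h)))).elim id id
            · exact (Int.even_mul.1 (hss.2 (Int.even_mul.2 (Or.inl h)))).elim id id
          obtain ⟨k, hk⟩ := heven
          have hkm : mB = k := by
            rw [hmBdef, PySem.Int.floordiv_eq_ediv_of_pos (by omega : (0:Int) < 2),
              show s - r = 2 * k by omega, Int.mul_ediv_cancel_left k (by omega)]
          have hkn : nB = k + r := by
            rw [hnBdef, PySem.Int.floordiv_eq_ediv_of_pos (by omega : (0:Int) < 2),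
              show s + r = 2 * (k + r) by omega, Int.mul_ediv_cancel_left (k + r) (by omega)]
          have hmBle : mB ≤ nB := by omega
          have hdvd : mB ∣ V := Dvd.intro _ hmBnB
          have hVdiv : V / mB = nB := by
            rw [← hmBnB, Int.mul_ediv_cancel_left nB (by omega)]
          have hsum : mB + nB = s := by omega
          have hmBq : mB ≤ pvIsqrt V :=
            (pv_le_isqrt_iff V mB (by omega) hmB1).2 (by nlinarith)
          exact hex ⟨mB, hmB1, hmBq, (pvGood_iff V E mB hV hmB1 hmBq).2
            ⟨hdvd, by rw [hVdiv]; omega⟩⟩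

-- ===== VERDICT (by name: the statement is the Claim_ definition above) =====
theorem find_grid_dimensions_and_validate_py_spec : Claim_equal_find_grid_dimensions_and_validate_py := by
  intro V adj _ hpre
  unfold Pre_find_grid_dimensions_and_validate_py at hpre
  unfold Spec_find_grid_dimensions_and_validate_py
  unfold find_grid_dimensions_and_validate_py find_grid_dimensions_and_validate_py_alt
  by_cases h0 : V = 0
  · rw [if_pos h0, if_pos h0]
  · rw [if_neg h0, if_neg h0]
    by_cases h1 : V = 1
    · rw [if_pos h1, if_pos h1]
      by_cases hc : adj ≠ [] ∧ PySem.List.pyGetD adj 0 [] ≠ []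
      · rw [if_pos ⟨hc.1, hc.2, Or.inr (by
          have := hc.2
          cases hl : PySem.List.pyGetD adj 0 [] with
          | nil => exact absurd hl this
          | cons a l => simp)⟩, if_pos hc]
      · rw [if_neg (fun h => hc ⟨h.1, h.2.1⟩), if_neg hc]
    · rw [if_neg h1, if_neg h1]
      have hV : 2 ≤ V := by omega
      have hV1 : 1 < V := by omega
      rw [pvA_degLoop_spec V adj hV1 (PySem.List.pyRange 0 V 1) (List.replicate V.toNat 0) 0]
      rw [pvB_degLoop_spec adj (PySem.List.pyRange 0 V 1) [] 0]
      by_cases hlen : (adj.length : Int) < V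
      · rw [if_pos hlen]
        rw [if_neg (by
          intro hforall
          have hmem : ((adj.length : Int)) ∈ PySem.List.pyRange 0 V 1 :=
            PySem.List.mem_pyRange_one.2 ⟨by positivity, hlen⟩
          exact absurd ((hforall _ hmem).1) (lt_irrefl _))]
      · rw [if_neg hlen]
        by_cases hall : ∀ i ∈ PySem.List.pyRange 0 V 1, pvOk adj i
        · rw [if_pos (fun i hi => ⟨by
            have := PySem.List.mem_pyRange_one.1 hi
            omega, hall i hi⟩), if_pos hall]
          have hVt : (((V.toNat : Nat) : Int)) = V := by omega
          have hmap := pvA_degrees_eq_map adj V.toNat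
          rw [hVt] at hmap
          rw [hmap]
          simp only [List.nil_append]
          by_cases hpar : PySem.Int.mod (0 + ((PySem.List.pyRange 0 V 1).map (pvDeg adj)).sum) 2 ≠ 0
          · rw [if_pos hpar, if_pos hpar]
          · rw [if_neg hpar, if_neg hpar]
            apply pvTail_eq _ _ _ hV
            intro x hx
            obtain ⟨i, hi, rfl⟩ := List.mem_map.1 hx
            have hok := hall i hi
            have hd0 := hok.1
            unfold pvDeg at hd0 ⊢
            omega
        · rw [if_neg (fun h => hall (fun i hi => (h i hi).2)), if_neg hall]
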